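-- pv_equiv track=rewrite | github.com/LuigiVampa92/xapk-to-apk | xapktoapk.py | get_do_not_compress_lines
-- ===== SOURCE A (Python) =====
-- def get_do_not_compress_lines(config_file_lines):
--     index_start = -1
--     index_end = -1
--     result = list()
--     start_block_literal = 'doNotCompress:'
--     prefix_target_line = '- '
--     opened = False
--     for index, line in enumerate(config_file_lines):
--         if not opened and line.startswith(start_block_literal):
--             opened = True
--             if index_end == -1 and index_start == -1:
--                 index_start = index + 1
--         elif opened and line.startswith(prefix_target_line):
--             result.append(line)
--         elif opened and not line.startswith(prefix_target_line):
--             if index_start != -1 and index_end == -1: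
--                 index_end = index - 1
--             break
--     result.sort()
--     return result, index_start, index_end
-- ===== SOURCE B (Python) =====
-- def get_do_not_compress_lines(config_file_lines):
--     lines = list(config_file_lines)
--     headers = [i for i, l in enumerate(lines) if l.startswith('doNotCompress:')]
--     if not headers:
--         return [], -1, -1
--     s = headers[0] + 1
--     block = lines[s:]
--     flags = [l.startswith('- ') for l in block]
--     k = flags.index(False) if False in flags else len(block)
--     index_end = s + k - 1 if k < len(block) else -1
--     return sorted(block[:k]), s, index_end
-- ===== Notes on version B (the rewrite author's own statement) =====
-- stated objective: alternative
-- what changed: Replaces A's single stateful scanning loop (an 'opened' flag, a four-way branch and a break) with a loop-free staged pipeline: a comprehension collects header indices, the tail is sliced off, a flags list plus list.index locates the block end, and the block prefix is sliced out.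
import Mathlib
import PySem

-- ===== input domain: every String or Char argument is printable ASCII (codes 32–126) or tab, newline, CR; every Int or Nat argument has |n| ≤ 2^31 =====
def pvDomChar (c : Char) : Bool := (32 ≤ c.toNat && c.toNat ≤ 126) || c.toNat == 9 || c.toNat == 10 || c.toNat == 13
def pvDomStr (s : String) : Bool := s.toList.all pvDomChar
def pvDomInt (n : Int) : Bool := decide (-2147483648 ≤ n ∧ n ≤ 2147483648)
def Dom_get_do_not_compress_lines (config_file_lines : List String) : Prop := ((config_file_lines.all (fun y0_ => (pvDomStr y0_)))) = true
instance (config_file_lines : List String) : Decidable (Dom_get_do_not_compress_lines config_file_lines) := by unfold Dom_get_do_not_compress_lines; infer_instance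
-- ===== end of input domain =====

-- B replaces A's single stateful scanning loop (an 'opened' flag, a four-way branch and a
-- break) by a loop-free staged pipeline: comprehension of header indices, slice of the tail,
-- a flags list, list.index to find the block end, slice of the block; same cost, simpler.

-- ===== PORT A =====
-- A's single for-loop with state (opened, index_start, index_end, result) and a break.
def goA (rest : List String) (index : Nat) (opened : Bool) (is ie : Int)
    (result : List String) : List String × Int × Int :=
  match rest with
  | [] => (PySem.List.sorted result (fun x => x) false, is, ie)
  | line :: t =>
    if !opened && PySem.Str.startswith line "doNotCompress:" then
      let is' := if ie == -1 && is == -1 then (index : Int) + 1 else is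
      goA t (index + 1) true is' ie result
    else if opened && PySem.Str.startswith line "- " then
      goA t (index + 1) opened is ie (result ++ [line])
    else if opened && !PySem.Str.startswith line "- " then
      -- break
      let ie' := if is != -1 && ie == -1 then (index : Int) - 1 else ie
      (PySem.List.sorted result (fun x => x) false, is, ie')
    else
      goA t (index + 1) opened is ie result

def get_do_not_compress_lines (config_file_lines : List String) : List String × Int × Int :=
  goA config_file_lines 0 false (-1) (-1) []

-- ===== PORT B =====
-- staged pipeline, no scanning loop: headers comprehension, slice, flags, index, slice.
def get_do_not_compress_lines_alt (config_file_lines : List String) : List String × Int × Int :=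
  let lines := config_file_lines
  let headers := ((PySem.List.enumerate lines).filter
      (fun p => PySem.Str.startswith p.2 "doNotCompress:")).map (fun p => p.1)
  match headers with
  | [] => ([], -1, -1)
  | h :: _ =>
    let s := h + 1
    let block := PySem.List.slice lines (some s)                -- lines[s:]
    let flags := block.map (fun l => PySem.Str.startswith l "- ")
    let k : Nat :=                                              -- flags.index(False) if False in flags else len(block)
      match PySem.List.index? flags false with
      | some k => k
      | none => block.length
    let index_end : Int := if k < block.length then s + (k : Int) - 1 else -1
    (PySem.List.sorted (block.take k) (fun x => x) false, s, index_end)   -- block[:k] (k ≥ 0) is take k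

-- ===== PRECONDITION & SPEC =====
def Spec_get_do_not_compress_lines (config_file_lines : List String) (out : List String × Int × Int) : Prop := out = get_do_not_compress_lines_alt config_file_lines
instance (config_file_lines : List String) (out : List String × Int × Int) : Decidable (Spec_get_do_not_compress_lines config_file_lines out) := by unfold Spec_get_do_not_compress_lines; infer_instance

-- ===== CLAIM (what is proved, stated in full; the proofs are below) =====
def Claim_equal_get_do_not_compress_lines : Prop := ∀ (config_file_lines : List String), Dom_get_do_not_compress_lines config_file_lines → Spec_get_do_not_compress_lines config_file_lines (get_do_not_compress_lines config_file_lines)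

-- ===== LEMMAS AND PROOFS =====

-- proof-side abbreviation: the k computed by B's pipeline for a given block.
def kOf (block : List String) : Nat :=
  (PySem.List.index? (block.map (fun l => PySem.Str.startswith l "- ")) false).getD block.length

theorem kOf_nil : kOf [] = 0 := by simp [kOf, PySem.List.index?]

theorem kOf_cons_true {l : String} (t : List String)
    (h : PySem.Chars.startswith l.toList ['-', ' '] = true) : kOf (l :: t) = kOf t + 1 := by
  simp only [kOf, List.map_cons, PySem.List.index?, List.idxOf?, List.findIdx?_cons]
  have hb : (PySem.Str.startswith l "- " == false) = false := by simp [h]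
  rw [hb]
  simp only [Bool.false_eq_true, if_false, List.length_cons]
  cases hfi : List.findIdx? (fun a => a == false) (t.map (fun l => PySem.Str.startswith l "- ")) with
  | none => simp
  | some m => simp

theorem kOf_cons_false {l : String} (t : List String)
    (h : PySem.Chars.startswith l.toList ['-', ' '] = false) : kOf (l :: t) = 0 := by
  simp only [kOf, List.map_cons, PySem.List.index?, List.idxOf?, List.findIdx?_cons]
  have hb : (PySem.Str.startswith l "- " == false) = true := by simp [h]
  rw [hb]
  simp

theorem kOf_match (block : List String) :
    (match PySem.List.index? (block.map (fun l => PySem.Str.startswith l "- ")) false with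
      | some k => k
      | none => block.length) = kOf block := by
  unfold kOf
  cases hfi : PySem.List.index? (block.map (fun l => PySem.Str.startswith l "- ")) false with
  | none => rfl
  | some m => rfl

-- proof-side restatement of B's staged pipeline with an arbitrary enumerate start s
-- (block expressed as a drop relative to s, so it commutes with peeling list heads).
def stagedAux (lines : List String) (s : Int) : List String × Int × Int :=
  match ((PySem.List.enumerate lines s).filter
      (fun p => PySem.Str.startswith p.2 "doNotCompress:")).map (fun p => p.1) with
  | [] => ([], -1, -1)
  | h :: _ =>
    let block := lines.drop ((h - s + 1).toNat)
    (PySem.List.sorted (block.take (kOf block)) (fun x => x) false, h + 1,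
      if kOf block < block.length then h + 1 + (kOf block : Int) - 1 else -1)

theorem headers_ge (lines : List String) (s : Int) (x : Int)
    (hx : x ∈ ((PySem.List.enumerate lines s).filter
      (fun p => PySem.Str.startswith p.2 "doNotCompress:")).map (fun p => p.1)) : s ≤ x := by
  induction lines generalizing s with
  | nil => simp [PySem.List.enumerate] at hx
  | cons l t ih =>
    rw [PySem.List.enumerate_cons, List.filter_cons] at hx
    by_cases h : PySem.Str.startswith l "doNotCompress:" = true
    · rw [if_pos h] at hx
      simp only [List.map_cons, List.mem_cons] at hx
      rcases hx with h1 | h2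
      · omega
      · have := ih (s + 1) h2; omega
    · rw [if_neg h] at hx
      have := ih (s + 1) hx; omega

theorem goA_opened (rest : List String) (j : Nat) (is : Int) (his : is ≠ -1)
    (acc : List String) :
    goA rest j true is (-1) acc =
      (PySem.List.sorted (acc ++ rest.take (kOf rest)) (fun x => x) false, is,
       if kOf rest < rest.length then (j : Int) + (kOf rest : Int) - 1 else -1) := by
  induction rest generalizing j acc with
  | nil => simp [goA, kOf_nil]
  | cons l t ih =>
    by_cases h : PySem.Chars.startswith l.toList ['-', ' '] = true
    · rw [show goA (l :: t) j true is (-1) acc = goA t (j + 1) true is (-1) (acc ++ [l]) from by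
        simp [goA, h]]
      rw [ih (j + 1) (acc ++ [l]), kOf_cons_true t h]
      simp only [List.take_succ_cons, List.append_assoc, List.singleton_append, List.length_cons]
      simp only [Prod.mk.injEq]
      and_intros <;> first
        | trivial
        | (split_ifs <;> push_cast <;> omega)
    · have h' : PySem.Chars.startswith l.toList ['-', ' '] = false := by
        simpa using h
      rw [kOf_cons_false t h']
      simp [goA, h', his]

theorem goA_staged (lines : List String) (i : Nat) :
    goA lines i false (-1) (-1) [] = stagedAux lines (i : Int) := by
  induction lines generalizing i with
  | nil => simp [goA, stagedAux, PySem.List.enumerate]; decide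
  | cons l t ih =>
    by_cases h : PySem.Chars.startswith l.toList ['d','o','N','o','t','C','o','m','p','r','e','s','s',':'] = true
    · rw [show goA (l :: t) i false (-1) (-1) [] = goA t (i + 1) true ((i : Int) + 1) (-1) []
          from by simp [goA, h]]
      rw [goA_opened t (i + 1) ((i : Int) + 1) (by omega) []]
      simp only [stagedAux, PySem.List.enumerate_cons, List.filter_cons]
      rw [if_pos (show PySem.Str.startswith ((i : Int), l).2 "doNotCompress:" = true from by simp [h])]
      simp only [List.map_cons]
      have hdrop : ((i : Int) - i + 1).toNat = 1 := by omega
      simp only [hdrop, List.drop_succ_cons, List.drop_zero, List.nil_append]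
      simp only [Prod.mk.injEq]
      and_intros <;> first
        | trivial
        | (split_ifs <;> push_cast <;> omega)
    · rw [show goA (l :: t) i false (-1) (-1) [] = goA t (i + 1) false (-1) (-1) []
          from by simp [goA, h]]
      rw [show goA t (i + 1) false (-1) (-1) [] = stagedAux t ((i : Int) + 1) from by
        have := ih (i + 1); simpa using this]
      simp only [stagedAux, PySem.List.enumerate_cons, List.filter_cons]
      rw [if_neg (show ¬ PySem.Str.startswith ((i : Int), l).2 "doNotCompress:" = true from by
        simp [h])]
      cases hh : ((PySem.List.enumerate t ((i : Int) + 1)).filter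
          (fun p => PySem.Str.startswith p.2 "doNotCompress:")).map (fun p => p.1) with
      | nil => simp [hh]
      | cons h0 r =>
        have hge : (i : Int) + 1 ≤ h0 := by
          apply headers_ge t ((i : Int) + 1) h0
          rw [hh]; exact List.mem_cons_self
        simp only [hh]
        have hd : (h0 - (i : Int) + 1).toNat = (h0 - ((i : Int) + 1) + 1).toNat + 1 := by omega
        simp [hd]

theorem alt_staged (lines : List String) :
    get_do_not_compress_lines_alt lines = stagedAux lines 0 := by
  unfold get_do_not_compress_lines_alt stagedAux
  cases hh : ((PySem.List.enumerate lines 0).filter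
      (fun p => PySem.Str.startswith p.2 "doNotCompress:")).map (fun p => p.1) with
  | nil => simp only [hh]
  | cons h0 r =>
    have hge : (0 : Int) ≤ h0 := by
      apply headers_ge lines 0 h0
      rw [hh]; exact List.mem_cons_self
    simp only [hh]
    rw [PySem.List.slice_from lines (by omega : (0 : Int) ≤ h0 + 1)]
    have heq : (h0 + 1).toNat = (h0 - 0 + 1).toNat := by omega
    rw [heq, kOf_match]

-- ===== VERDICT (by name: the statement is the Claim_ definition above) =====
theorem get_do_not_compress_lines_spec : Claim_equal_get_do_not_compress_lines := by
  intro lines _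
  unfold Spec_get_do_not_compress_lines get_do_not_compress_lines
  rw [alt_staged]
  exact goA_staged lines 0
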